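-- pv_equiv track=rewrite | github.com/ju-hu-sang/codingtest | 프로그래머스/0/181854. 배열의 길이에 따라 다른 연산하기/배열의 길이에 따라 다른 연산하기.py | solution
-- ===== SOURCE A (Python) =====
-- def solution(arr, n):
--     arr1 = []
--     arr2 = []
--     if len(arr) % 2 ==1 :
--         for i in range(len(arr)):
--             if i%2 ==0:
--                 arr1.append(arr[i]+n)
--             else:
--                 arr1.append(arr[i])
--         return arr1
--     else:
--         for i in range(len(arr)):
--             if i%2 == 1:
--                 arr2.append(arr[i]+n)
--             else:
--                 arr2.append(arr[i])
--         return arr2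
-- ===== SOURCE B (Python) =====
-- def solution(arr, n):
--     start = 0 if len(arr) % 2 == 1 else 1
--     res = list(arr)
--     res[start::2] = [x + n for x in res[start::2]]
--     return res
-- ===== Notes on version B (the rewrite author's own statement) =====
-- stated objective: idiomatic
-- what changed: Replaces the duplicated index loops with a per-index parity branch by computing the start parity once, copying the list, and bumping exactly the affected positions via an extended-slice assignment res[start::2].
import Mathlib
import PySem

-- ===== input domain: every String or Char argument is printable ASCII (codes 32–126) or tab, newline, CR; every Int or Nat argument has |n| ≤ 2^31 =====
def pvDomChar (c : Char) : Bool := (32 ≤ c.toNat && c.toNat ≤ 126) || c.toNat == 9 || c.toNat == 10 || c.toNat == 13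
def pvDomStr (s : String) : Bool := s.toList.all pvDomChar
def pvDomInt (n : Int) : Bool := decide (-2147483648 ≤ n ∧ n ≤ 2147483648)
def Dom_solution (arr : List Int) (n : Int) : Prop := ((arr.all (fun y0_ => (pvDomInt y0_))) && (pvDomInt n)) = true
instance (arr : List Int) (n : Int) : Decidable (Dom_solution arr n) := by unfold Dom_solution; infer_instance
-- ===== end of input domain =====

-- B builds one strided-slice update instead of A's duplicated per-index parity loops (idiomatic; same O(n) cost).

-- ===== PORT A =====
def solution (arr : List Int) (n : Int) : List Int :=
  if arr.length % 2 == 1 then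
    (PySem.List.pyRange 0 (arr.length : Int) 1).foldl
      (fun arr1 i =>
        if i % 2 == 0 then arr1 ++ [PySem.List.pyGetD arr i 0 + n]
        else arr1 ++ [PySem.List.pyGetD arr i 0]) []
  else
    (PySem.List.pyRange 0 (arr.length : Int) 1).foldl
      (fun arr2 i =>
        if i % 2 == 1 then arr2 ++ [PySem.List.pyGetD arr i 0 + n]
        else arr2 ++ [PySem.List.pyGetD arr i 0]) []

-- ===== PORT B =====
-- res[start::2] read: every second element starting at the head
def stride2 : List Int → List Int
  | [] => []
  | [a] => [a]
  | a :: _ :: rest => a :: stride2 rest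

-- res[start::2] = vals write (matched lengths, as Python's extended-slice assignment requires)
def setStride2 : List Int → List Int → List Int
  | l, [] => l
  | [], _ :: _ => []
  | [_], v :: _ => [v]
  | _ :: b :: rest, v :: vt => v :: b :: setStride2 rest vt

def solution_alt (arr : List Int) (n : Int) : List Int :=
  let start : Nat := if arr.length % 2 = 1 then 0 else 1
  let tl := arr.drop start
  arr.take start ++ setStride2 tl ((stride2 tl).map (· + n))

-- ===== PRECONDITION & SPEC =====
def Spec_solution (arr : List Int) (n : Int) (out : List Int) : Prop := out = solution_alt arr n
instance (arr : List Int) (n : Int) (out : List Int) : Decidable (Spec_solution arr n out) := by unfold Spec_solution; infer_instance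

-- ===== CLAIM (what is proved, stated in full; the proofs are below) =====
def Claim_equal_solution : Prop := ∀ (arr : List Int) (n : Int), Dom_solution arr n → Spec_solution arr n (solution arr n)

-- ===== LEMMAS AND PROOFS =====

-- two-elements-at-a-time induction on lists
theorem twoStepInd {motive : List Int → Prop} (h0 : motive []) (h1 : ∀ a, motive [a])
    (h2 : ∀ a b l, motive l → motive (a :: b :: l)) : ∀ l, motive l
  | [] => h0
  | [a] => h1 a
  | a :: b :: rest => h2 a b rest (twoStepInd h0 h1 h2 rest)

-- reference "bump even positions" function used only in the proofs
def bump (f : Int → Int) : List Int → List Int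
  | [] => []
  | [a] => [f a]
  | a :: b :: rest => f a :: b :: bump f rest

theorem bump_length (f : Int → Int) (l : List Int) : (bump f l).length = l.length := by
  induction l using twoStepInd <;> simp [bump, *]

theorem bump_getElem (f : Int → Int) (l : List Int) (i : Nat) (h : i < l.length) :
    (bump f l)[i]'(by rw [bump_length]; exact h) =
      if i % 2 = 0 then f (l[i]'h) else l[i]'h := by
  induction l using twoStepInd generalizing i with
  | h0 => simp at h
  | h1 a =>
    have h0 : i = 0 := by simp at h; omega
    subst h0; simp [bump]
  | h2 a b rest ih =>
    match i with
    | 0 => simp [bump]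
    | 1 => simp [bump]
    | (j+2) =>
      have hj : j < rest.length := by simpa using h
      have := ih j hj
      simpa [bump, Nat.add_mod_right] using this

theorem setStride2_map_stride2 (f : Int → Int) (l : List Int) :
    setStride2 l ((stride2 l).map f) = bump f l := by
  induction l using twoStepInd with
  | h0 => simp [stride2, setStride2, bump]
  | h1 a => simp [stride2, setStride2, bump]
  | h2 a b rest ih => simp [stride2, setStride2, bump, ih]

-- A's loop as a map over its index range
theorem loopA_eq_map (arr : List Int) (h : Int → Int) :
    (PySem.List.pyRange 0 (arr.length : Int) 1).foldl
        (fun acc i => acc ++ [h i]) [] =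
      (PySem.List.pyRange 0 (arr.length : Int) 1).map h := by
  rw [PySem.List.foldl_append_singleton_eq_map, List.nil_append]

theorem parity_cast (i : Nat) : ((i : Int) % 2 == 0) = decide (i % 2 = 0) := by
  rcases Nat.even_or_odd i with he | ho
  · have : i % 2 = 0 := Nat.even_iff.mp he
    simp [this]; omega
  · have : i % 2 = 1 := Nat.odd_iff.mp ho
    simp [this]; omega

theorem parity_cast1 (i : Nat) : ((i : Int) % 2 == 1) = decide (i % 2 = 1) := by
  rcases Nat.even_or_odd i with he | ho
  · have : i % 2 = 0 := Nat.even_iff.mp he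
    simp [this]; omega
  · have : i % 2 = 1 := Nat.odd_iff.mp ho
    simp [this]; omega

theorem solution_spec : Claim_equal_solution := by
  intro arr n _
  unfold Spec_solution solution solution_alt
  by_cases hodd : arr.length % 2 = 1
  · -- odd length: bump even indices of the whole list
    simp only [hodd, beq_self_eq_true, if_pos, List.take_zero, List.drop_zero,
      List.nil_append, setStride2_map_stride2]
    have hbranch :
        (fun (acc : List Int) (i : Int) =>
          if i % 2 == 0 then acc ++ [PySem.List.pyGetD arr i 0 + n]
          else acc ++ [PySem.List.pyGetD arr i 0]) =
        (fun acc i => acc ++ [if i % 2 == 0 then PySem.List.pyGetD arr i 0 + n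
                              else PySem.List.pyGetD arr i 0]) := by
      funext acc i; split <;> rfl
    rw [hbranch, loopA_eq_map]
    apply List.ext_getElem
    · simp [bump_length, PySem.List.length_pyRange_one]
    · intro i h1 h2
      have hi : i < arr.length := by
        simpa [PySem.List.length_pyRange_one] using h1
      rw [bump_getElem _ _ _ hi]
      rw [List.getElem_map, PySem.List.getElem_pyRange_one, zero_add]
      have hget : PySem.List.pyGetD arr (i : Int) 0 = arr[i]'hi := by
        simp [PySem.List.pyGetD_natCast, List.getD_eq_getElem?_getD,
          List.getElem?_eq_getElem hi]
      rw [hget, parity_cast]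
      by_cases hp : i % 2 = 0 <;> simp [hp]
  · -- even length: first element untouched, bump even indices of the tail
    have heq : (arr.length % 2 == 1) = false := by simp; omega
    simp only [heq, Bool.false_eq_true, if_false]
    have hif : (if arr.length % 2 = 1 then (0 : Nat) else 1) = 1 := if_neg hodd
    match arr with
    | [] => simp [setStride2, stride2, PySem.List.pyRange]
    | a :: rest =>
      rw [hif]
      simp only [List.take_succ_cons, List.take_zero, List.drop_succ_cons, List.drop_zero,
        setStride2_map_stride2]
      have hbranch :
          (fun (acc : List Int) (i : Int) =>
            if i % 2 == 1 then acc ++ [PySem.List.pyGetD (a :: rest) i 0 + n]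
            else acc ++ [PySem.List.pyGetD (a :: rest) i 0]) =
          (fun acc i => acc ++ [if i % 2 == 1 then PySem.List.pyGetD (a :: rest) i 0 + n
                                else PySem.List.pyGetD (a :: rest) i 0]) := by
        funext acc i; split <;> rfl
      rw [hbranch, loopA_eq_map]
      apply List.ext_getElem
      · simp [bump_length, PySem.List.length_pyRange_one]
      · intro i h1 h2
        have hi : i < (a :: rest).length := by
          simpa [PySem.List.length_pyRange_one] using h1
        rw [List.getElem_map, PySem.List.getElem_pyRange_one, zero_add]
        have hget : PySem.List.pyGetD (a :: rest) (i : Int) 0 = (a :: rest)[i]'hi := by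
          simp [PySem.List.pyGetD_natCast, List.getD_eq_getElem?_getD,
            List.getElem?_eq_getElem hi]
        rw [hget, parity_cast1]
        match i with
        | 0 =>
          simp
        | (j+1) =>
          have hj : j < rest.length := by simpa using hi
          have hr : ([a] ++ bump (· + n) rest)[j+1]'h2 =
              (bump (· + n) rest)[j]'(by rw [bump_length]; exact hj) := by
            simp
          rw [hr, bump_getElem _ _ _ hj]
          by_cases hp : j % 2 = 0
          · have : (j + 1) % 2 = 1 := by omega
            simp [hp, this]
          · have : ¬ (j + 1) % 2 = 1 := by omega
            simp [hp, this]
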